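-- pv_equiv track=rewrite | github.com/Ni1xson/telegram-channel-monitor-main | monitor/filters.py | _check_all_words
-- ===== SOURCE A (Python) =====
-- from typing import List, Tuple, Dict
--
-- def _check_all_words(
--     text: str, keywords: List[str]
-- ) -> Tuple[List[str], List[Tuple[int, int]]]:
--     """Проверка на содержание всех ключевых слов"""
--     matched = []
--     positions = []
--
--     all_found = True
--     for keyword in keywords:
--         if keyword in text:
--             matched.append(keyword)
--             pos = text.find(keyword)
--             positions.append((pos, pos + len(keyword)))
--         else:
--             all_found = False
--             break
--
--     if not all_found:
--         return [], []
--
--     return matched, positions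
-- ===== SOURCE B (Python) =====
-- from typing import List, Tuple, Optional
--
-- def _check_all_words(
--     text: str, keywords: List[str]
-- ) -> Tuple[List[str], List[Tuple[int, int]]]:
--     # Recursive Option-style decomposition: membership is decided by find() < 0,
--     # a None from any suffix propagates up, and the result lists are built by
--     # consing onto the recursive result.
--     def go(ks: List[str]) -> Optional[Tuple[List[str], List[Tuple[int, int]]]]:
--         if not ks:
--             return ([], [])
--         k = ks[0]
--         pos = text.find(k)
--         if pos < 0:
--             return None
--         tail = go(ks[1:])
--         if tail is None:
--             return None
--         return ([k] + tail[0], [(pos, pos + len(k))] + tail[1])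
--
--     r = go(keywords)
--     return r if r is not None else ([], [])
-- ===== Notes on version B (the rewrite author's own statement) =====
-- stated objective: alternative
-- what changed: Replaces A's iterative loop with accumulators and a break flag by a recursion over the keyword list that returns an Option: membership is decided by find() < 0 (find is computed once per keyword instead of `in` plus find), a missing keyword anywhere propagates None, and the lists are built front-to-back by consing onto the recursive result.
import Mathlib
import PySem

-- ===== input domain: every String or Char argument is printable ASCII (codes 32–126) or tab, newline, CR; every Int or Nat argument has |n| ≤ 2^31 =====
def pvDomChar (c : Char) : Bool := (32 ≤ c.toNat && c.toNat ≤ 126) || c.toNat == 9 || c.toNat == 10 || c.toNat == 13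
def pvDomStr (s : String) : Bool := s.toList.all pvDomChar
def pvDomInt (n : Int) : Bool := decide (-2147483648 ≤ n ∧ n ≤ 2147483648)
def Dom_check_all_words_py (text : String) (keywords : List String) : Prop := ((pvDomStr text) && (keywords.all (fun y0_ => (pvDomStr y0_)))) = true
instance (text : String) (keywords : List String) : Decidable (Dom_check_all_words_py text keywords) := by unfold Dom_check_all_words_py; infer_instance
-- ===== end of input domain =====

-- B replaces A's iterative accumulator-and-break loop by an Option-returning recursion over the keywords (membership via find < 0, lists built by consing); objective: alternative, not faster.


-- ===== PORT A =====
-- loop over keywords, accumulating matched/positions; `false` flag = the `break` after all_found = False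
def check_all_words_py_loop (text : String) : List String → List String → List (Int × Int) →
    (List String × List (Int × Int)) × Bool
  | [], matched, positions => ((matched, positions), true)
  | keyword :: rest, matched, positions =>
    if PySem.Str.isIn keyword text then
      let pos : Int := PySem.Str.find text keyword
      check_all_words_py_loop text rest (matched ++ [keyword])
        (positions ++ [(pos, pos + (PySem.Str.len keyword : Int))])
    else ((matched, positions), false)

def check_all_words_py (text : String) (keywords : List String) : List String × (List (Int × Int)) :=
  let r := check_all_words_py_loop text keywords [] []
  if r.2 = false then ([], []) else r.1

-- ===== PORT B =====
-- recursive helper `go` from Source B: find < 0 → none, none propagates, cons onto the recursive result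
def check_all_words_py_alt_go (text : String) : List String → Option (List String × List (Int × Int))
  | [] => some ([], [])
  | k :: rest =>
    let pos : Int := PySem.Str.find text k
    if pos < 0 then none
    else
      match check_all_words_py_alt_go text rest with
      | none => none
      | some tail => some (k :: tail.1, (pos, pos + (PySem.Str.len k : Int)) :: tail.2)

def check_all_words_py_alt (text : String) (keywords : List String) : List String × (List (Int × Int)) :=
  match check_all_words_py_alt_go text keywords with
  | some r => r
  | none => ([], [])

-- ===== PRECONDITION & SPEC =====
def Spec_check_all_words_py (text : String) (keywords : List String) (out : List String × (List (Int × Int))) : Prop := out = check_all_words_py_alt text keywords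
instance (text : String) (keywords : List String) (out : List String × (List (Int × Int))) : Decidable (Spec_check_all_words_py text keywords out) := by unfold Spec_check_all_words_py; infer_instance

-- ===== CLAIM (what is proved, stated in full; the proofs are below) =====
def Claim_equal_check_all_words_py : Prop := ∀ (text : String) (keywords : List String), Dom_check_all_words_py text keywords → Spec_check_all_words_py text keywords (check_all_words_py text keywords)

-- ===== LEMMAS AND PROOFS =====

-- find text k < 0 in B is the negation of `k in text` in A
theorem find_neg_iff (text k : String) :
    (PySem.Str.find text k < 0) ↔ PySem.Str.isIn k text = false := by
  rw [← not_le, PySem.Str.find_nonneg_iff, ← PySem.Str.isIn_iff_infix]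
  simp

def pvFn (text k : String) : Int × Int :=
  (PySem.Str.find text k, PySem.Str.find text k + (PySem.Str.len k : Int))

theorem go_all_true (text : String) :
    ∀ (ks : List String), ks.all (fun kw => PySem.Str.isIn kw text) = true →
    check_all_words_py_alt_go text ks = some (ks, ks.map (pvFn text)) := by
  intro ks
  induction ks with
  | nil => intro _; simp [check_all_words_py_alt_go]
  | cons k rest ih =>
    intro h
    simp only [List.all_cons, Bool.and_eq_true] at h
    have hnn : (0:Int) ≤ PySem.Chars.find text.toList k.toList := by
      have : ¬ (PySem.Str.find text k < 0) := by
        rw [find_neg_iff]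
        have h1 := h.1
        simp only [PySem.Str.isIn_eq] at h1 ⊢
        simp [h1]
      simpa [PySem.Str.find_eq] using not_lt.mp this
    simp [check_all_words_py_alt_go, hnn, ih h.2, pvFn]

theorem go_all_false (text : String) :
    ∀ (ks : List String), ks.all (fun kw => PySem.Str.isIn kw text) = false →
    check_all_words_py_alt_go text ks = none := by
  intro ks
  induction ks with
  | nil => intro h; simp at h
  | cons k rest ih =>
    intro h
    simp only [List.all_cons, Bool.and_eq_false_iff] at h
    by_cases hk : PySem.Str.isIn k text = true
    · have hr : rest.all (fun kw => PySem.Str.isIn kw text) = false := by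
        rcases h with h | h
        · rw [hk] at h; exact Bool.noConfusion h
        · exact h
      have hnn : (0:Int) ≤ PySem.Chars.find text.toList k.toList := by
        have : ¬ (PySem.Str.find text k < 0) := by
          rw [find_neg_iff]
          have h1 := hk
          simp only [PySem.Str.isIn_eq] at h1 ⊢
          simp [h1]
        simpa [PySem.Str.find_eq] using not_lt.mp this
      simp [check_all_words_py_alt_go, hnn, ih hr]
    · have hlt : PySem.Chars.find text.toList k.toList < 0 := by
        have : PySem.Str.find text k < 0 := by
          rw [find_neg_iff]
          have h1 := hk
          simp only [PySem.Str.isIn_eq] at h1 ⊢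
          simpa using h1
        simpa [PySem.Str.find_eq] using this
      simp [check_all_words_py_alt_go, not_le.mpr hlt]

theorem loop_all_true (text : String) :
    ∀ (ks m : List String) (p : List (Int × Int)),
    ks.all (fun kw => PySem.Str.isIn kw text) = true →
    check_all_words_py_loop text ks m p = ((m ++ ks, p ++ ks.map (pvFn text)), true) := by
  intro ks
  induction ks with
  | nil => intro m p _; simp [check_all_words_py_loop]
  | cons kw rest ih =>
    intro m p h
    simp only [List.all_cons, Bool.and_eq_true] at h
    simp only [check_all_words_py_loop, h.1, ih _ _ h.2]
    simp [pvFn]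

theorem loop_all_false (text : String) :
    ∀ (ks m : List String) (p : List (Int × Int)),
    ks.all (fun kw => PySem.Str.isIn kw text) = false →
    (check_all_words_py_loop text ks m p).2 = false := by
  intro ks
  induction ks with
  | nil => intro m p h; simp at h
  | cons kw rest ih =>
    intro m p h
    simp only [List.all_cons, Bool.and_eq_false_iff] at h
    by_cases hk : PySem.Str.isIn kw text = true
    · have hr : rest.all (fun kw => PySem.Str.isIn kw text) = false := by
        rcases h with h | h
        · rw [hk] at h; exact Bool.noConfusion h
        · exact h
      simp only [check_all_words_py_loop, hk]
      exact ih _ _ hr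
    · simp only [check_all_words_py_loop, if_neg hk]

-- ===== VERDICT (by name: the statement is the Claim_ definition above) =====
theorem check_all_words_py_spec : Claim_equal_check_all_words_py := by
  intro text keywords _
  unfold Spec_check_all_words_py check_all_words_py check_all_words_py_alt
  by_cases h : keywords.all (fun kw => PySem.Str.isIn kw text) = true
  · rw [loop_all_true text keywords [] [] h, go_all_true text keywords h]
    rw [if_neg (by decide : ¬ ((true:Bool) = false))]; simp
  · have hf : keywords.all (fun kw => PySem.Str.isIn kw text) = false := by simpa using h
    rw [go_all_false text keywords hf]
    have h' := loop_all_false text keywords [] [] hf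
    rw [if_pos h']
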